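-- pv_equiv track=rewrite | github.com/RyanWhitell/music | helpers/general.py | get_common_eq
-- ===== SOURCE A (Python) =====
-- def get_common_eq(note_list):
--     '''
--     Returns the most common enharmonic equivalents in the list.
--     '''
--     temp_note = 'ERROR: Note not in list'
--     for note in note_list:
--         if len(note) == 1:
--             return note
--         if len(note) == 2 and  "#" in note:
--             temp_note = note
--     return temp_note
-- ===== SOURCE B (Python) =====
-- def get_common_eq(note_list):
--     '''
--     Returns the most common enharmonic equivalents in the list.
--     '''
--     one = next((n for n in note_list if len(n) == 1), None)
--     if one is not None:
--         return one
--     sharps = [n for n in note_list if len(n) == 2 and "#" in n]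
--     return sharps[-1] if sharps else 'ERROR: Note not in list'
-- ===== Notes on version B (the rewrite author's own statement) =====
-- stated objective: simpler
-- what changed: Replaces A's single stateful pass with a last-sharp accumulator by two independent declarative scans: a first-match search for a length-1 note, then a filter for two-character sharp notes taking the last element.
import Mathlib
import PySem

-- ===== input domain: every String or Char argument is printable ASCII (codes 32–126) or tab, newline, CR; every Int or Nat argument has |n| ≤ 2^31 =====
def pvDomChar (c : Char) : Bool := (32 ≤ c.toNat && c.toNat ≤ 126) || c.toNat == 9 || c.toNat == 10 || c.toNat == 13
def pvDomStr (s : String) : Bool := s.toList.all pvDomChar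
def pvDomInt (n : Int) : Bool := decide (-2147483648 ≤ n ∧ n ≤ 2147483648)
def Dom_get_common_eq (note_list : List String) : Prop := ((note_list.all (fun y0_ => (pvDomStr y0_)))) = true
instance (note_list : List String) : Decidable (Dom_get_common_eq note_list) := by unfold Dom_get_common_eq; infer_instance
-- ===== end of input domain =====

-- B replaces A's single stateful pass (early return + last-sharp accumulator) by two
-- independent scans: first-match search for a length-1 note, then filter-and-take-last;
-- objective: simpler.

-- ===== PORT A =====
-- literal transliteration: loop with the running temp_note and early return
def get_common_eq_go : List String → String → String
  | [], temp_note => temp_note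
  | note :: rest, temp_note =>
    if PySem.Str.len note = 1 then note
    else
      get_common_eq_go rest
        (if PySem.Str.len note = 2 ∧ PySem.Str.isIn "#" note then note else temp_note)

def get_common_eq (note_list : List String) : String :=
  get_common_eq_go note_list "ERROR: Note not in list"

-- ===== PORT B =====
def get_common_eq_alt (note_list : List String) : String :=
  match note_list.find? (fun n => PySem.Str.len n == 1) with
  | some one => one
  | none =>
    let sharps := note_list.filter (fun n => PySem.Str.len n == 2 && PySem.Str.isIn "#" n)
    match sharps.getLast? with
    | some s => s
    | none => "ERROR: Note not in list"

-- ===== PRECONDITION & SPEC =====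
def Spec_get_common_eq (note_list : List String) (out : String) : Prop := out = get_common_eq_alt note_list
instance (note_list : List String) (out : String) : Decidable (Spec_get_common_eq note_list out) := by unfold Spec_get_common_eq; infer_instance

-- ===== CLAIM (what is proved, stated in full; the proofs are below) =====
def Claim_equal_get_common_eq : Prop := ∀ (note_list : List String), Dom_get_common_eq note_list → Spec_get_common_eq note_list (get_common_eq note_list)

-- ===== LEMMAS AND PROOFS =====

-- A's loop computes B's decomposition, for any starting accumulator (stated via Option.getD).
theorem go_eq (nl : List String) (temp : String) :
    get_common_eq_go nl temp =
      (nl.find? (fun n => PySem.Str.len n == 1)).getD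
        (((nl.filter (fun n => PySem.Str.len n == 2 && PySem.Str.isIn "#" n)).getLast?).getD temp) := by
  induction nl generalizing temp with
  | nil => rfl
  | cons note rest ih =>
    by_cases hp : (PySem.Str.len note == 1) = true
    · rw [get_common_eq_go, if_pos (beq_iff_eq.mp hp), List.find?_cons_of_pos (p := fun n => PySem.Str.len n == 1) (a := note) (l := rest) hp]
      rfl
    · rw [get_common_eq_go, if_neg (fun h => hp (beq_iff_eq.mpr h)),
        List.find?_cons_of_neg (p := fun n => PySem.Str.len n == 1) (a := note) (l := rest) hp, List.filter_cons]
      by_cases hq : (PySem.Str.len note == 2 && PySem.Str.isIn "#" note) = true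
      · have hq' : PySem.Str.len note = 2 ∧ PySem.Str.isIn "#" note = true := by
          simp only [Bool.and_eq_true, beq_iff_eq] at hq; exact hq
        rw [if_pos hq', if_pos hq, ih, List.getLast?_cons, Option.getD_some]
      · have hq' : ¬ (PySem.Str.len note = 2 ∧ PySem.Str.isIn "#" note = true) := by
          intro h; exact hq (by simp only [Bool.and_eq_true, beq_iff_eq]; exact h)
        rw [if_neg hq', if_neg hq, ih]

-- ===== VERDICT (by name: the statement is the Claim_ definition above) =====
theorem get_common_eq_spec : Claim_equal_get_common_eq := by
  intro nl _
  unfold Spec_get_common_eq get_common_eq get_common_eq_alt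
  rw [go_eq]
  cases hf : nl.find? (fun n => PySem.Str.len n == 1) with
  | some one => rfl
  | none =>
    cases hl : (nl.filter (fun n => PySem.Str.len n == 2 && PySem.Str.isIn "#" n)).getLast? with
    | some s => simp only [hl]; rfl
    | none => simp only [hl]; rfl
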